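-- pv_equiv track=rewrite | github.com/Moolut/pi-works | main.py | replace_prime_number
-- ===== SOURCE A (Python) =====
-- def check_prime(number):
--     # Checks whether the number is prime or not and return boolean
--     # Takes a number as an argument
--     # number -> integer
--     is_prime = True
--
--     if number > 1:
--         for i in range(2, number):
--             if (number % i) == 0:
--                 is_prime = False
--                 break
--     else:
--         is_prime = False
--
--     return  0 if is_prime else number
--
-- def replace_prime_number(triangle):
--     # Replaces the prime numbers with None in the 2D array and returns it back
--     # Takes a triangle as an argument
--     # triangle -> 2D array
--
--     prime_array = []
--     rows = len(triangle)
--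
--     for i in range(rows):
--         columns = len(triangle[i])
--         prime_row = []
--         for j in range(columns):
--             prime_row.append(check_prime(triangle[i][j]))
--         prime_array.append(prime_row)
--     return  prime_array
-- ===== SOURCE B (Python) =====
-- def replace_prime_number(triangle):
--     # Same result via trial division only up to sqrt(n), and list comprehensions.
--     def _is_prime(n):
--         if n <= 1:
--             return False
--         i = 2
--         while i * i <= n:
--             if n % i == 0:
--                 return False
--             i += 1
--         return True
--     return [[0 if _is_prime(v) else v for v in row] for row in triangle]
-- ===== Notes on version B (the rewrite author's own statement) =====
-- stated objective: faster
-- what changed: check_prime's trial division over the full range(2, n) is replaced by trial division only up to sqrt(n) (while i*i <= n), and the nested index loops building rows via append are replaced by nested list comprehensions over the values.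
import Mathlib
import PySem

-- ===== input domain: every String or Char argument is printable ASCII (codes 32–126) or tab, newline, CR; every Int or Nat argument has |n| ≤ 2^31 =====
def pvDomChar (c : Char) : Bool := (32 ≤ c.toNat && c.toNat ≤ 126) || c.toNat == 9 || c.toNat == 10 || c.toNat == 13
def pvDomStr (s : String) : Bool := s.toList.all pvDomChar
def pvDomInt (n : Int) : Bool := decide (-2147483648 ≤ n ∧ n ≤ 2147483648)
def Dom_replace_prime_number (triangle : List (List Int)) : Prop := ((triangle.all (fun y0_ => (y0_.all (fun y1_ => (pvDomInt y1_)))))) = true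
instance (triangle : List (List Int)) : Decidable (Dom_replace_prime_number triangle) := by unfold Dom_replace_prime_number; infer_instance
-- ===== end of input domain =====

-- B replaces check_prime's trial division over range(2, n) by trial division only up
-- to sqrt(n) (while i*i <= n) and builds the result with nested comprehensions
-- (objective: faster — O(√n) per entry instead of O(n)).

-- ===== PORT A =====
-- check_prime: flag starts true, the range(2, number) loop breaks on the first divisor.
def check_prime (number : Int) : Int :=
  let is_prime : Bool :=
    if number > 1 then
      !((PySem.List.pyRange 2 number 1).any (fun i => PySem.Int.mod number i == 0))
    else false
  if is_prime then 0 else number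

def replace_prime_number (triangle : List (List Int)) : List (List Int) :=
  (PySem.List.pyRange 0 triangle.length 1).foldl (fun prime_array i =>
    prime_array ++ [(PySem.List.pyRange 0 (PySem.List.pyGetD triangle i []).length 1).foldl
      (fun prime_row j => prime_row ++ [check_prime (PySem.List.pyGetD (PySem.List.pyGetD triangle i []) j 0)]) []]) []

-- ===== PORT B =====
-- while i * i <= n: …  from Source B's _is_prime
def pvIsPrimeGo (n i : Int) : Bool :=
  if i * i ≤ n then
    if PySem.Int.mod n i == 0 then false else pvIsPrimeGo n (i + 1)
  else true
  termination_by (n + 1 - i).toNat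
  decreasing_by
    rename_i _h
    have hi : i ≤ n := by
      rcases le_or_gt i 0 with h0 | h0
      · nlinarith [mul_self_nonneg i]
      · nlinarith
    omega

def pvIsPrime (n : Int) : Bool :=
  if n ≤ 1 then false else pvIsPrimeGo n 2

def replace_prime_number_alt (triangle : List (List Int)) : List (List Int) :=
  triangle.map (fun row => row.map (fun v => if pvIsPrime v then 0 else v))

-- ===== PRECONDITION & SPEC =====
def Spec_replace_prime_number (triangle : List (List Int)) (out : List (List Int)) : Prop := out = replace_prime_number_alt triangle
instance (triangle : List (List Int)) (out : List (List Int)) : Decidable (Spec_replace_prime_number triangle out) := by unfold Spec_replace_prime_number; infer_instance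

-- ===== CLAIM (what is proved, stated in full; the proofs are below) =====
def Claim_equal_replace_prime_number : Prop := ∀ (triangle : List (List Int)), Dom_replace_prime_number triangle → Spec_replace_prime_number triangle (replace_prime_number triangle)

-- ===== LEMMAS AND PROOFS =====

-- The while-loop returns true iff no j ≥ i with j*j ≤ n divides n.
theorem pvIsPrimeGo_iff_aux (k : Nat) : ∀ n i : Int, 0 < i → (n + 1 - i).toNat ≤ k →
    (pvIsPrimeGo n i = true ↔ ∀ j : Int, i ≤ j → j * j ≤ n → PySem.Int.mod n j ≠ 0) := by
  induction k with
  | zero =>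
    intro n i hpos hk
    have hni : n < i := by omega
    have hno : ¬ i * i ≤ n := by
      intro h
      nlinarith
    rw [pvIsPrimeGo]
    simp only [hno, if_false]
    constructor
    · intro _ j hij hjj
      exact absurd hjj (by nlinarith)
    · intro _; trivial
  | succ k ih =>
    intro n i hpos hk
    rw [pvIsPrimeGo]
    by_cases h : i * i ≤ n
    · have hi : i ≤ n := by
        rcases le_or_gt i 0 with h0 | h0
        · nlinarith [mul_self_nonneg i]
        · nlinarith
      simp only [h, if_true]
      by_cases hd : PySem.Int.mod n i = 0
      · simp only [beq_iff_eq, hd, if_true]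
        constructor
        · intro hfalse; exact absurd hfalse (by simp)
        · intro hall; exact absurd hd (hall i le_rfl h)
      · simp only [beq_iff_eq, hd, if_false]
        rw [ih n (i + 1) (by omega) (by omega)]
        constructor
        · intro hall j hij hjj
          rcases eq_or_lt_of_le hij with rfl | hlt
          · exact hd
          · exact hall j (by omega) hjj
        · intro hall j hij hjj; exact hall j (by omega) hjj
    · simp only [h, if_false]
      constructor
      · intro _ j hij hjj
        exfalso
        apply h
        nlinarith
      · intro _; trivial

theorem pvIsPrimeGo_iff (n i : Int) (hpos : 0 < i) :
    pvIsPrimeGo n i = true ↔ ∀ j : Int, i ≤ j → j * j ≤ n → PySem.Int.mod n j ≠ 0 :=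
  pvIsPrimeGo_iff_aux (n + 1 - i).toNat n i hpos le_rfl

-- Divisibility bridge for positive numbers.
theorem mod_zero_iff_dvd_toNat (n j : Int) (hn : 0 < n) (hj : 0 < j) :
    PySem.Int.mod n j = 0 ↔ j.toNat ∣ n.toNat := by
  rw [PySem.Int.mod_eq_emod_of_pos hj]
  constructor
  · intro h
    have hd : j ∣ n := Int.dvd_of_emod_eq_zero h
    rw [← Int.toNat_of_nonneg hj.le, ← Int.toNat_of_nonneg hn.le] at hd
    exact Int.natCast_dvd_natCast.mp hd
  · intro h
    have hd : j ∣ n := by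
      have := Int.natCast_dvd_natCast.mpr h
      rwa [Int.toNat_of_nonneg hj.le, Int.toNat_of_nonneg hn.le] at this
    exact Int.emod_eq_zero_of_dvd hd

-- Per-entry agreement: A's range(2,n) test equals B's sqrt-bounded test.
theorem check_prime_eq (v : Int) : check_prime v = if pvIsPrime v then 0 else v := by
  by_cases hv : v > 1
  · have hN2 : 2 ≤ v.toNat := by omega
    unfold check_prime pvIsPrime
    simp only [hv, if_true, if_neg (by omega : ¬ v ≤ 1)]
    have hA : (!((PySem.List.pyRange 2 v 1).any (fun i => PySem.Int.mod v i == 0))) = true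
        ↔ Nat.Prime v.toNat := by
      rw [Nat.prime_def_lt']
      simp only [Bool.not_eq_eq_eq_not, Bool.not_true, List.any_eq_false,
        PySem.List.mem_pyRange_one]
      constructor
      · intro hall
        refine ⟨hN2, fun m h2m hmN hdvd => ?_⟩
        have h1 := hall (m : Int) ⟨by exact_mod_cast h2m, by omega⟩
        have h2 : PySem.Int.mod v (m : Int) = 0 :=
          (mod_zero_iff_dvd_toNat v m (by omega) (by omega)).mpr (by simpa using hdvd)
        rw [h2] at h1
        exact h1 (by simp)
      · rintro ⟨-, hnd⟩ i ⟨h2i, hiv⟩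
        simp only [beq_iff_eq]
        intro hmod
        have hdvd := (mod_zero_iff_dvd_toNat v i (by omega) (by omega)).mp hmod
        exact hnd i.toNat (by omega) (by omega) hdvd
    have hB : pvIsPrimeGo v 2 = true ↔ Nat.Prime v.toNat := by
      rw [pvIsPrimeGo_iff v 2 (by omega), Nat.prime_def_le_sqrt]
      constructor
      · intro hall
        refine ⟨hN2, fun m h2m hms hdvd => ?_⟩
        have hle : m * m ≤ v.toNat := Nat.le_sqrt.mp hms
        have hmm : (m : Int) * (m : Int) ≤ v := by
          have : ((m * m : Nat) : Int) ≤ ((v.toNat : Nat) : Int) := by exact_mod_cast hle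
          push_cast at this
          omega
        exact hall (m : Int) (by exact_mod_cast h2m) hmm
          ((mod_zero_iff_dvd_toNat v m (by omega) (by omega)).mpr (by simpa using hdvd))
      · rintro ⟨-, hnd⟩ j h2j hjj hmod
        have hdvd := (mod_zero_iff_dvd_toNat v j (by omega) (by omega)).mp hmod
        have hjs : j.toNat ≤ Nat.sqrt v.toNat := by
          rw [Nat.le_sqrt]
          have : ((j.toNat * j.toNat : Nat) : Int) ≤ ((v.toNat : Nat) : Int) := by
            push_cast
            rw [Int.toNat_of_nonneg (by omega : (0:Int) ≤ j), Int.toNat_of_nonneg (by omega : (0:Int) ≤ v)]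
            exact hjj
          exact_mod_cast this
        exact hnd j.toNat (by omega) hjs hdvd
    have hbool : (!((PySem.List.pyRange 2 v 1).any (fun i => PySem.Int.mod v i == 0)))
        = pvIsPrimeGo v 2 := by
      rw [Bool.eq_iff_iff, hA, hB]
    rw [hbool]
  · unfold check_prime pvIsPrime
    simp [hv, (by omega : v ≤ 1)]

theorem replace_prime_number_eq_map (triangle : List (List Int)) :
    replace_prime_number triangle = triangle.map (fun row => row.map check_prime) := by
  unfold replace_prime_number
  rw [PySem.List.foldl_pyRange_zero_pyGetD' triangle []
    (fun acc row => acc ++ [(PySem.List.pyRange 0 row.length 1).foldl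
      (fun prime_row j => prime_row ++ [check_prime (PySem.List.pyGetD row j 0)]) []]) []]
  rw [PySem.List.foldl_append_singleton_eq_map]
  simp only [List.nil_append]
  apply List.map_congr_left
  intro row _
  rw [PySem.List.foldl_pyRange_zero_pyGetD' row 0
    (fun acc x => acc ++ [check_prime x]) []]
  rw [PySem.List.foldl_append_singleton_eq_map]
  simp

-- ===== VERDICT (by name: the statement is the Claim_ definition above) =====
theorem replace_prime_number_spec : Claim_equal_replace_prime_number := by
  intro triangle _
  unfold Spec_replace_prime_number replace_prime_number_alt
  rw [replace_prime_number_eq_map]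
  apply List.map_congr_left
  intro row _
  apply List.map_congr_left
  intro v _
  exact check_prime_eq v
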